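-- pv_equiv track=rewrite | github.com/2021-Algorithm-CNUstudy/solution | 원송희/kakao_가사검색.py | makeWildCard1
-- ===== SOURCE A (Python) =====
-- def makeWildCard1(arr):
--     toReturn=[]
--     for i in range (len(arr)):
--         for j in range(1, len(arr[i])+1):
--             s_list=list(arr[i])
--             for k in range(0, j, 1):
--                 s_list[k]="?"
--             toReturn.append("".join(s_list))
--     return toReturn
-- ===== SOURCE B (Python) =====
-- def makeWildCard1(arr):
--     return ['?' * j + w[j:] for w in arr for j in range(1, len(w) + 1)]
-- ===== Notes on version B (the rewrite author's own statement) =====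
-- stated objective: simpler
-- what changed: Replaces the index-driven triple loop that copies each word to a char list and overwrites it one position at a time with a single comprehension emitting the closed form '?'*j + w[j:] per (word, j).
import Mathlib
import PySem

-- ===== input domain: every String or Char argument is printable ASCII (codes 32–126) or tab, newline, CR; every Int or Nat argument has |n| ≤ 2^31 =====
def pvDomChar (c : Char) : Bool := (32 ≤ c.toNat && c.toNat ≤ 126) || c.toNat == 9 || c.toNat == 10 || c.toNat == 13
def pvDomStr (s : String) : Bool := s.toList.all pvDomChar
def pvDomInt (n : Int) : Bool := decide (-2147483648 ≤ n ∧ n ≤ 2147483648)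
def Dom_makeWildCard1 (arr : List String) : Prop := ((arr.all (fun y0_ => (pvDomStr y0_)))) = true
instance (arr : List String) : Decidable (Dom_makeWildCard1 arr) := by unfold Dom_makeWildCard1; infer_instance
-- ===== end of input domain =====

-- B replaces A's triple loop (copy word to a char list, overwrite positions 0..j-1 one by one)
-- with a comprehension emitting the closed form '?'*j + w[j:]; objective: simpler.

-- ===== PORT A =====
def makeWildCard1 (arr : List String) : List String :=
  (PySem.List.pyRange 0 (PySem.List.len arr) 1).foldl (fun toReturn i =>
    (PySem.List.pyRange 1 (PySem.Str.len (PySem.List.pyGetD arr i "") + 1) 1).foldl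
      (fun tr j =>
        let sList := (PySem.List.pyGetD arr i "").toList
        let sList := (PySem.List.pyRange 0 j 1).foldl (fun s k => s.set k.toNat '?') sList
        tr ++ [String.ofList sList]) toReturn) []

-- ===== PORT B =====
def makeWildCard1_alt (arr : List String) : List String :=
  arr.flatMap (fun w =>
    (PySem.List.pyRange 1 (PySem.Str.len w + 1) 1).map (fun j =>
      String.ofList (List.replicate j.toNat '?' ++ w.toList.drop j.toNat)))

-- ===== PRECONDITION & SPEC =====
def Spec_makeWildCard1 (arr : List String) (out : List String) : Prop := out = makeWildCard1_alt arr
instance (arr : List String) (out : List String) : Decidable (Spec_makeWildCard1 arr out) := by unfold Spec_makeWildCard1; infer_instance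

-- ===== CLAIM (what is proved, stated in full; the proofs are below) =====
def Claim_equal_makeWildCard1 : Prop := ∀ (arr : List String), Dom_makeWildCard1 arr → Spec_makeWildCard1 arr (makeWildCard1 arr)

-- ===== LEMMAS AND PROOFS =====

-- A's inner masking loop computes '?'*n ++ drop n.
theorem pv_mask_eq (cs : List Char) (n : Nat) (h : n ≤ cs.length) :
    (PySem.List.pyRange 0 (n : Int) 1).foldl (fun s k => s.set k.toNat '?') cs
      = List.replicate n '?' ++ cs.drop n := by
  induction n with
  | zero => simp [PySem.List.pyRange_one_eq_nil]
  | succ n ih =>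
    rw [show ((n + 1 : Nat) : Int) = (n : Int) + 1 by push_cast; ring,
        PySem.List.pyRange_one_succ_right (by positivity), List.foldl_append,
        ih (by omega)]
    simp only [List.foldl_cons, List.foldl_nil, Int.toNat_natCast]
    simp only [List.set_append, List.length_replicate, lt_irrefl, Nat.sub_self]
    rw [List.drop_eq_getElem_cons (show n < cs.length by omega), List.set_cons_zero,
        List.replicate_succ', List.append_assoc, List.singleton_append]
    simp only [if_false]

theorem pv_foldl_flatMap {α β : Type} (F : List β → α → List β) (G : α → List β)
    (h : ∀ acc x, F acc x = acc ++ G x) :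
    ∀ (l : List α) (acc : List β), l.foldl F acc = acc ++ l.flatMap G := by
  intro l
  induction l with
  | nil => simp
  | cons x xs ih => intro acc; rw [List.foldl_cons, h, ih, List.flatMap_cons, List.append_assoc]

theorem makeWildCard1_spec : Claim_equal_makeWildCard1 := by
  intro arr _
  unfold Spec_makeWildCard1 makeWildCard1 makeWildCard1_alt
  rw [PySem.List.foldl_pyRange_zero_pyGetD arr ""
      (fun toReturn w =>
        (PySem.List.pyRange 1 (PySem.Str.len w + 1) 1).foldl
          (fun tr j =>
            tr ++ [String.ofList ((PySem.List.pyRange 0 j 1).foldl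
              (fun s k => s.set k.toNat '?') w.toList)]) toReturn) []]
  have hf : ∀ (acc : List String) (w : String),
      (PySem.List.pyRange 1 (PySem.Str.len w + 1) 1).foldl
        (fun tr j =>
          tr ++ [String.ofList ((PySem.List.pyRange 0 j 1).foldl
            (fun s k => s.set k.toNat '?') w.toList)]) acc
      = acc ++ (PySem.List.pyRange 1 (PySem.Str.len w + 1) 1).map (fun j =>
          String.ofList (List.replicate j.toNat '?' ++ w.toList.drop j.toNat)) := by
    intro acc w
    rw [PySem.List.foldl_append_singleton_eq_map]
    congr 1
    apply List.map_congr_left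
    intro j hj
    rw [PySem.List.mem_pyRange_one] at hj
    have hw : PySem.Str.len w = (w.toList.length : Int) := by
      simp [PySem.Str.len_eq]
    have h1 : j = ((j.toNat : Nat) : Int) := by omega
    have h2 : j.toNat ≤ w.toList.length := by omega
    conv_lhs => rw [h1, pv_mask_eq w.toList j.toNat h2]
  rw [pv_foldl_flatMap _ _ (fun acc w => hf acc w) arr [], List.nil_append]
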